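-- pv_equiv track=rewrite | github.com/strogera/AoC2018 | Day 12/d12.py | getWithoutTrailingDots
-- ===== SOURCE A (Python) =====
-- def getWithoutTrailingDots(state):
--     stateWithout = ""
--     removeDots = True
--     for i in range(len(state)):
--         if removeDots and state[i] == ".":
--             continue
--         removeDots = False
--         stateWithout += state[i]
--     for i in range(len(state)-1, 0, -1):
--         if state[i] == ".":
--             stateWithout = stateWithout[:-1]
--         else:
--             break
--     return stateWithout
-- ===== SOURCE B (Python) =====
-- def getWithoutTrailingDots(state):
--     start = 0
--     end = len(state)
--     while start < end and state[start] == ".":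
--         start += 1
--     while end > start and state[end - 1] == ".":
--         end -= 1
--     return state[start:end]
-- ===== Notes on version B (the rewrite author's own statement) =====
-- stated objective: simpler
-- what changed: B keeps two integer cursors (advance start past leading dots, retreat end past trailing dots) and returns one slice, instead of A's character-by-character accumulator string plus a second index pass that chops the tail one character at a time.
import Mathlib
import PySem

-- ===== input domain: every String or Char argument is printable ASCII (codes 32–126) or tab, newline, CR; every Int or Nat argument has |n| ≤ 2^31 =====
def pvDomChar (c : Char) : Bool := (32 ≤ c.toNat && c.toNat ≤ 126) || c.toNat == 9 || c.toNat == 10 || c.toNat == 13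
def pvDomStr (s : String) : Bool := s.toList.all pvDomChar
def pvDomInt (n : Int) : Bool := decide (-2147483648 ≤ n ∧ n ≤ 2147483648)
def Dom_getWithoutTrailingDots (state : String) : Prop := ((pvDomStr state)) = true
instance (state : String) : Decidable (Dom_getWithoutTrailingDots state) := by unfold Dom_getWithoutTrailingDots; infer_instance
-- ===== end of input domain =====

-- B replaces A's accumulator-string build and tail-chopping second pass by two
-- integer cursors and a single slice (objective: simpler).

-- ===== PORT A =====
-- second loop: `for i in range(len(state)-1, 0, -1): if state[i]=='.': w = w[:-1] else: break`.
-- Argument m is i+1, so indices m-1 = n-1, …, 1 are visited and index 0 never is;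
-- `w[:-1]` on a Python string is dropLast (PySem.List.slice_to_neg_one).
def pvLoopA2 (l : List Char) : Nat → List Char → List Char
  | 0, w => w
  | 1, w => w
  | (e+2), w => if l[e+1]? = some '.' then pvLoopA2 l (e+1) w.dropLast else w

-- first loop: fold over the characters with state (stateWithout, removeDots)
def getWithoutTrailingDots (state : String) : String :=
  let l := state.toList
  let p := l.foldl (fun (st : List Char × Bool) c =>
      if st.2 && (c == '.') then st else (st.1 ++ [c], false)) ([], true)
  String.ofList (pvLoopA2 l l.length p.1)

-- ===== PORT B =====
-- `while start < end and state[start] == '.': start += 1` (end is len(state) here)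
def pvStartLoop (l : List Char) (s : Nat) : Nat :=
  if h : s < l.length ∧ l[s]? = some '.' then pvStartLoop l (s+1) else s
termination_by l.length - s
decreasing_by omega

-- `while end > start and state[end-1] == '.': end -= 1`
def pvEndLoop (l : List Char) (start : Nat) : Nat → Nat
  | 0 => 0
  | (e+1) => if start ≤ e ∧ l[e]? = some '.' then pvEndLoop l start e else e+1

def getWithoutTrailingDots_alt (state : String) : String :=
  let l := state.toList
  let s := pvStartLoop l 0
  let e := pvEndLoop l s l.length
  -- `state[start:end]`
  PySem.Str.slice state (some (s : Int)) (some (e : Int))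

-- ===== PRECONDITION & SPEC =====
def Spec_getWithoutTrailingDots (state : String) (out : String) : Prop := out = getWithoutTrailingDots_alt state
instance (state : String) (out : String) : Decidable (Spec_getWithoutTrailingDots state out) := by unfold Spec_getWithoutTrailingDots; infer_instance

-- ===== CLAIM (what is proved, stated in full; the proofs are below) =====
def Claim_equal_getWithoutTrailingDots : Prop := ∀ (state : String), Dom_getWithoutTrailingDots state → Spec_getWithoutTrailingDots state (getWithoutTrailingDots state)

-- ===== LEMMAS AND PROOFS =====

-- A's first loop builds acc ++ dropWhile (· == '.') l
theorem pvFold1 (l : List Char) (acc : List Char) :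
    (l.foldl (fun (st : List Char × Bool) c =>
      if st.2 && (c == '.') then st else (st.1 ++ [c], false)) (acc, true)).1
      = acc ++ l.dropWhile (· == '.') ∧
    (l.foldl (fun (st : List Char × Bool) c =>
      if st.2 && (c == '.') then st else (st.1 ++ [c], false)) (acc, false)).1
      = acc ++ l := by
  induction l generalizing acc with
  | nil => simp
  | cons c r ih =>
    by_cases h : (c == '.') = true
    · have hc : c = '.' := by simpa using h
      subst hc
      refine ⟨?_, ?_⟩
      · simpa [List.dropWhile_cons] using (ih acc).1
      · simp only [List.foldl_cons, Bool.false_and, Bool.false_eq_true, if_false, Bool.and_self]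
        rw [(ih (acc ++ ['.'])).2]
        simp
    · refine ⟨?_, ?_⟩ <;>
      · simp only [List.foldl_cons, h, Bool.and_false, Bool.false_eq_true, if_false, List.dropWhile_cons]
        rw [(ih (acc ++ [c])).2]
        simp [h]

theorem pvLoopA2_nil (l : List Char) (m : Nat) : pvLoopA2 l m [] = [] := by
  induction m using Nat.strong_induction_on with
  | _ m ih =>
    match m with
    | 0 => rfl
    | 1 => rfl
    | (e+2) =>
      simp only [pvLoopA2, List.dropLast_nil]
      split
      · exact ih (e+1) (by omega)
      · rfl

theorem pvStartLoop_eq (l : List Char) (s : Nat) :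
    pvStartLoop l s = s + ((l.drop s).takeWhile (· == '.')).length := by
  fun_induction pvStartLoop l s with
  | case1 s h ih =>
      obtain ⟨hlt, hget⟩ := h
      have hd : l.drop s = '.' :: l.drop (s+1) := by
        rw [List.drop_eq_getElem_cons hlt]
        have h2 := List.getElem?_eq_getElem hlt
        rw [h2] at hget
        rw [Option.some.inj hget]
      rw [ih, hd]
      simp
      omega
  | case2 s h =>
      by_cases hlt : s < l.length
      · have hget : ¬ l[s]? = some '.' := fun hc => h ⟨hlt, hc⟩
        have hd : l.drop s = l[s] :: l.drop (s+1) := List.drop_eq_getElem_cons hlt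
        have hne : (l[s] == '.') = false := by
          have h2 := List.getElem?_eq_getElem hlt
          simp only [beq_eq_false_iff_ne, ne_eq]
          intro hc
          exact hget (by rw [h2, hc])
        rw [hd]
        simp [hne]
      · rw [List.drop_eq_nil_of_le (by omega)]
        simp

theorem pvInv (l : List Char) (s : Nat) (hs : s < l.length)
    (hnd : ¬ l[s]? = some '.')
    (m : Nat) (h1 : s < m) (h2 : m ≤ l.length) :
    pvLoopA2 l m ((l.drop s).take (m - s)) = (l.drop s).take (pvEndLoop l s m - s) := by
  induction m using Nat.strong_induction_on with
  | _ m ih =>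
    match m, h1, h2 with
    | 1, h1, h2 =>
      -- index 0 is not visited by A's loop; B's guard fails since l[0] is not a dot
      have hs0 : s = 0 := by omega
      subst hs0
      simp [pvLoopA2, pvEndLoop, hnd]
    | (e+2), h1, h2 =>
      by_cases hd : l[e+1]? = some '.'
      · have hne : ¬ s = e + 1 := fun hc => hnd (hc ▸ hd)
        have hlt : s < e + 1 := by omega
        have hstep : ((l.drop s).take (e + 2 - s)).dropLast = (l.drop s).take (e + 1 - s) := by
          rw [List.dropLast_eq_take, List.take_take, List.length_take, List.length_drop]
          congr 1
          omega
        have hguard : (s ≤ e + 1 ∧ l[e+1]? = some '.') := ⟨by omega, hd⟩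
        rw [pvLoopA2, if_pos hd, hstep, ih (e+1) (by omega) hlt (by omega)]
        conv_rhs => rw [pvEndLoop, if_pos hguard]
      · rw [pvLoopA2, if_neg hd, pvEndLoop]
        rw [if_neg (fun hc => hd hc.2)]

-- ===== VERDICT (by name: the statement is the Claim_ definition above) =====
-- the head of dropWhile does not satisfy the predicate
theorem pvHead_dropWhile (p : Char → Bool) (l : List Char) (c : Char)
    (h : (l.dropWhile p).head? = some c) : p c = false := by
  induction l with
  | nil => simp at h
  | cons a r ih =>
    rw [List.dropWhile_cons] at h
    split at h
    · exact ih h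
    · simp_all

theorem getWithoutTrailingDots_spec : Claim_equal_getWithoutTrailingDots := by
  intro state _
  unfold Spec_getWithoutTrailingDots getWithoutTrailingDots getWithoutTrailingDots_alt
  simp only []
  set l := state.toList with hl
  set s := pvStartLoop l 0 with hsdef
  set e := pvEndLoop l s l.length with hedef
  -- B's slice, on the list side
  have hB : PySem.Str.slice state (some (s : Int)) (some (e : Int))
      = String.ofList ((l.drop s).take (e - s)) := by
    have h1 : (PySem.Str.slice state (some (s : Int)) (some (e : Int))).toList
        = (l.drop s).take (e - s) := by
      rw [PySem.Str.toList_slice, PySem.Chars.slice_eq_listSlice, PySem.List.slice_natCast]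
    rw [← h1, String.ofList_toList]
  rw [hB]
  -- A's first loop is dropWhile
  have hw : (l.foldl (fun (st : List Char × Bool) c =>
      if st.2 && (c == '.') then st else (st.1 ++ [c], false)) ([], true)).1
      = l.dropWhile (· == '.') := by
    simpa using (pvFold1 l []).1
  set w := l.dropWhile (· == '.') with hwdef
  have hs : s = (l.takeWhile (· == '.')).length := by simpa using pvStartLoop_eq l 0
  have hsplit := List.takeWhile_append_dropWhile (p := (· == '.')) (l := l)
  have hdrop : l.drop s = w := by
    rw [hs]
    calc l.drop (l.takeWhile (· == '.')).length
        = ((l.takeWhile (· == '.')) ++ w).drop (l.takeWhile (· == '.')).length := by rw [hsplit]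
      _ = w := List.drop_left
  have hlen : l.length = s + w.length := by
    have := congrArg List.length hsplit
    rw [List.length_append, ← hwdef] at this
    omega
  congr 1
  rw [hw]
  by_cases hwe : w = []
  · rw [hwe, pvLoopA2_nil, hdrop, hwe, List.take_nil]
  · have hsl : s < l.length := by
      have : w.length ≠ 0 := fun hc => hwe (List.eq_nil_of_length_eq_zero hc)
      omega
    have hnd : ¬ l[s]? = some '.' := by
      intro hc
      have hh : (l.drop s).head? = l[s]? := by rw [List.head?_drop]
      rw [hdrop, hc] at hh
      have := pvHead_dropWhile (· == '.') l '.' (hwdef ▸ hh)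
      simp at this
    have hmain := pvInv l s hsl hnd l.length hsl le_rfl
    have hfull : (l.drop s).take (l.length - s) = l.drop s := by
      apply List.take_of_length_le
      simp
    rw [hfull, hdrop] at hmain
    rw [hmain, hdrop]
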